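-- pv_equiv track=rewrite | github.com/cmg189/aes_simplified | main.py | parity_bit
-- ===== SOURCE A (Python) =====
-- def parity_bit(text, key_length):
-- 	# a char requires a parity bit if its binary ascii value contains an odd amount of 1s
-- 	# party bit of 1 will be added to the most significant bit
--
-- 	# predetermined which uppercase letters will need a parity bit and the resulting hexadecimal value
-- 	chars = ['C', 'E', 'F', 'I', 'J', 'L', 'O', 'Q', 'R', 'T', 'W', 'X']
-- 	hex = ['c3', 'c5', 'c6', 'c9', 'ca', 'cc', 'cf', 'd1', 'd2', 'd4', 'd7', 'd8']
-- 	bits = dict( zip(chars, hex) )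
--
-- 	hex_string = ''
-- 	for i in range(len(text)):
-- 		# replace chars that need parity bit
-- 		if text[i] in bits:
-- 			hex_string += bits.get(text[i])
-- 		# convert chars to hex value if not party bit is needed
-- 		else:
-- 			chars_hex = format( ord(text[i]), 'x' )
-- 			hex_string += chars_hex
--
-- 	return hex_string
-- ===== SOURCE B (Python) =====
-- def parity_bit(text, key_length):
--     out = []
--     for ch in text:
--         o = ord(ch)
--         # parity bit: uppercase letters whose ASCII value has an odd number of 1-bits
--         if 'A' <= ch <= 'Z' and bin(o).count('1') % 2 == 1:
--             o |= 0x80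
--         out.append(format(o, 'x'))
--     return ''.join(out)
-- ===== Notes on version B (the rewrite author's own statement) =====
-- stated objective: simpler
-- what changed: Replaces the hardcoded 12-entry char-to-hex substitution table and per-index dict lookups with a direct per-character computation: set the parity (MSB) bit when the character is an uppercase letter with odd popcount, then format to hex.
import Mathlib
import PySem

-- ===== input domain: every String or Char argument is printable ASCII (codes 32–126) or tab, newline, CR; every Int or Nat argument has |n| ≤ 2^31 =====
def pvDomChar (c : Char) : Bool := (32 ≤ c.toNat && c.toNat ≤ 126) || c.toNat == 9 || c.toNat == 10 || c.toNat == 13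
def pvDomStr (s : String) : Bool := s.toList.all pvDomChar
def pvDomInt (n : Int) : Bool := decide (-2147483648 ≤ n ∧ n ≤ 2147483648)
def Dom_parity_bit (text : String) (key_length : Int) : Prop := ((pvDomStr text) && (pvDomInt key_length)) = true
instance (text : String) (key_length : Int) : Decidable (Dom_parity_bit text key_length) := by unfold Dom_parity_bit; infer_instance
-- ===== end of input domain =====

-- B computes the parity substitution directly (uppercase letter with odd popcount → set the MSB)
-- instead of A's hardcoded 12-entry lookup table; same cost, simpler.

-- shared helper: format(n, 'x') for n ≥ 0 (lowercase hex, no prefix); fuel-structured so the kernel reduces it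
def pvHexDigit (n : Nat) : Char := if n < 10 then Char.ofNat (48 + n) else Char.ofNat (87 + n)
def pvHexAux : Nat → Nat → List Char
  | 0, n => [pvHexDigit (n % 16)]
  | fuel + 1, n => if n < 16 then [pvHexDigit n] else pvHexAux fuel (n / 16) ++ [pvHexDigit (n % 16)]
def pvHex (n : Nat) : List Char := pvHexAux n n

-- ===== PORT A =====
-- A's substitution table: chars, hex, and bits = dict(zip(chars, hex))
def pvTableChars : List Char := ['C', 'E', 'F', 'I', 'J', 'L', 'O', 'Q', 'R', 'T', 'W', 'X']
def pvTableHex : List String := ["c3", "c5", "c6", "c9", "ca", "cc", "cf", "d1", "d2", "d4", "d7", "d8"]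
def pvBits : PySem.Dict Char String := PySem.Dict.ofList (pvTableChars.zip pvTableHex)
-- per-character body of A's loop: table lookup, else plain hex
def pvBodyA (acc : List Char) (c : Char) : List Char :=
  match pvBits.get? c with
  | some h => acc ++ h.toList
  | none => acc ++ pvHex c.toNat

def parity_bit (text : String) (key_length : Int) : String :=
  String.ofList ((PySem.List.pyRange 0 (PySem.List.len text.toList) 1).foldl
    (fun acc i => pvBodyA acc (PySem.List.pyGetD text.toList i ' ')) [])

-- ===== PORT B =====
def pvSub (ch : Char) : Nat :=
  let o := ch.toNat
  if 'A' ≤ ch ∧ ch ≤ 'Z' ∧ PySem.Int.bitCount (o : Int) % 2 = 1 then o ||| 0x80 else o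

def parity_bit_alt (text : String) (key_length : Int) : String :=
  String.ofList ((text.toList.map (fun ch => pvHex (pvSub ch))).flatten)

-- ===== PRECONDITION & SPEC =====
def Spec_parity_bit (text : String) (key_length : Int) (out : String) : Prop := out = parity_bit_alt text key_length
instance (text : String) (key_length : Int) (out : String) : Decidable (Spec_parity_bit text key_length out) := by unfold Spec_parity_bit; infer_instance

-- ===== CLAIM (what is proved, stated in full; the proofs are below) =====
def Claim_equal_parity_bit : Prop := ∀ (text : String) (key_length : Int), Dom_parity_bit text key_length → Spec_parity_bit text key_length (parity_bit text key_length)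

-- ===== LEMMAS AND PROOFS =====

-- per-character agreement, enumerated over the domain's codepoints
set_option maxRecDepth 8192 in
lemma pv_char_fin : ∀ n : Fin 127, pvDomChar (Char.ofNat n) →
    pvBodyA [] (Char.ofNat n) = pvHex (pvSub (Char.ofNat n)) := by decide

lemma pvBodyA_append (acc : List Char) (c : Char) : pvBodyA acc c = acc ++ pvBodyA [] c := by
  unfold pvBodyA; cases h : pvBits.get? c <;> simp [h]

lemma pv_char_eq (c : Char) (h : pvDomChar c = true) : pvBodyA [] c = pvHex (pvSub c) := by
  have hlt : c.toNat < 127 := by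
    simp [pvDomChar] at h; omega
  have hc : Char.ofNat c.toNat = c := Char.ofNat_toNat c
  have := pv_char_fin ⟨c.toNat, hlt⟩
  rw [hc] at this
  exact this h

lemma pv_flat (cs : List Char) (h : cs.all pvDomChar = true) :
    cs.flatMap (fun c => pvBodyA [] c) = (cs.map (fun ch => pvHex (pvSub ch))).flatten := by
  induction cs with
  | nil => rfl
  | cons c cs ih =>
    simp only [List.all_cons, Bool.and_eq_true] at h
    simp [List.flatMap_cons, pv_char_eq c h.1, ih h.2]

-- ===== VERDICT (by name: the statement is the Claim_ definition above) =====
theorem parity_bit_spec : Claim_equal_parity_bit := by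
  intro text key_length hdom
  have hall : text.toList.all pvDomChar = true := by
    simp only [Dom_parity_bit, pvDomStr, Bool.and_eq_true] at hdom
    exact hdom.1
  unfold Spec_parity_bit parity_bit parity_bit_alt
  rw [PySem.List.foldl_pyRange_zero_pyGetD]
  have hfun : pvBodyA = fun acc c => acc ++ pvBodyA [] c := by
    funext acc c; exact pvBodyA_append acc c
  rw [hfun, PySem.List.foldl_append_eq_flatMap, List.nil_append, pv_flat _ hall]
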